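-- pv_equiv track=rewrite | github.com/VisheshRajput-dev/task-pointsfly | attempt1etihad/utils.py | format_flight_data
-- ===== SOURCE A (Python) =====
-- def format_flight_data(flights):
--     """
--     Formats a list of flight dictionaries into a readable table string.
--     Supports Etihad format (single price, may have different fare classes).
--     """
--     if not flights:
--         return "No flights found."
--
--     # Etihad format (similar to IndiGo - single price)
--     headers = ["Airline", "Flight", "Departure", "Arrival", "Duration", "Price", "Points"]
--
--     # Calculate column widths
--     col_widths = {header: len(header) for header in headers}
--     for flight in flights:
--         col_widths["Airline"] = max(col_widths["Airline"], len(flight.get('airline', 'N/A')))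
--         col_widths["Flight"] = max(col_widths["Flight"], len(flight.get('flight_number', 'N/A')))
--         col_widths["Departure"] = max(col_widths["Departure"], len(flight.get('departure_time', 'N/A')))
--         col_widths["Arrival"] = max(col_widths["Arrival"], len(flight.get('arrival_time', 'N/A')))
--         col_widths["Duration"] = max(col_widths["Duration"], len(flight.get('duration', 'N/A')))
--         col_widths["Price"] = max(col_widths["Price"], len(flight.get('price', 'N/A')))
--         col_widths["Points"] = max(col_widths["Points"], len(flight.get('award_points', 'N/A')))
--
--     # Build header line
--     header_line = " | ".join(header.ljust(col_widths[header]) for header in headers)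
--     separator_line = "-+-".join("-" * col_widths[header] for header in headers)
--
--     result = [header_line, separator_line]
--
--     # Add flight data
--     for flight in flights:
--         row = []
--         row.append(flight.get('airline', 'N/A').ljust(col_widths["Airline"]))
--         row.append(flight.get('flight_number', 'N/A').ljust(col_widths["Flight"]))
--         row.append(flight.get('departure_time', 'N/A').ljust(col_widths["Departure"]))
--         row.append(flight.get('arrival_time', 'N/A').ljust(col_widths["Arrival"]))
--         row.append(flight.get('duration', 'N/A').ljust(col_widths["Duration"]))
--         row.append(flight.get('price', 'N/A').ljust(col_widths["Price"]))
--         row.append(flight.get('award_points', 'N/A').ljust(col_widths["Points"]))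
--         result.append(" | ".join(row))
--
--     result.append(f"\nTotal flights found: {len(flights)}")
--     return "\n".join(result)
-- ===== SOURCE B (Python) =====
-- def format_flight_data(flights):
--     if not flights:
--         return "No flights found."
--
--     fields = [('Airline', 'airline'), ('Flight', 'flight_number'),
--               ('Departure', 'departure_time'), ('Arrival', 'arrival_time'),
--               ('Duration', 'duration'), ('Price', 'price'),
--               ('Points', 'award_points')]
--
--     # Column-major: build, measure and pad one whole column per field.
--     cols = []
--     for header, key in fields:
--         cells = [header] + [f.get(key, 'N/A') for f in flights]
--         w = max(len(c) for c in cells)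
--         cols.append([c.ljust(w) for c in cells])
--
--     # Transpose the padded columns back into output rows.
--     rows = [" | ".join(r) for r in zip(*cols)]
--     # Every cell of a padded column has the column width, so the
--     # separator can be read off the (padded) header cells.
--     sep = "-+-".join("-" * len(col[0]) for col in cols)
--     return "\n".join([rows[0], sep] + rows[1:] +
--                      ["\nTotal flights found: %d" % len(flights)])
-- ===== Notes on version B (the rewrite author's own statement) =====
-- stated objective: alternative
-- what changed: B builds the table column-major -- for each field it materializes, measures and pads one whole column (header cell included) -- then transposes the padded columns with zip(*cols) to obtain the output rows and reads the separator widths off the padded header cells, instead of A's row-major passes with seven hard-coded max updates and seven per-row appends.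
import Mathlib
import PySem

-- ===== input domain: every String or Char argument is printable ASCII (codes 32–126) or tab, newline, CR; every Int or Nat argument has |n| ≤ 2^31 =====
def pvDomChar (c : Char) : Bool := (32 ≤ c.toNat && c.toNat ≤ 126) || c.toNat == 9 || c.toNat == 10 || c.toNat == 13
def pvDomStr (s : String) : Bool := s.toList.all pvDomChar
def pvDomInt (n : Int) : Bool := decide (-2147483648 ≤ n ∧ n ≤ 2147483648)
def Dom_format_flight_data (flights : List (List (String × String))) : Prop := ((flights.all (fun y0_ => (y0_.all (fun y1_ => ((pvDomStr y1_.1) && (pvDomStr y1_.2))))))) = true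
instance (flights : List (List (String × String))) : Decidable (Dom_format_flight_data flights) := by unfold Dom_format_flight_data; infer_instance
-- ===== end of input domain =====

-- B builds the table column-major — one fully padded column per field, output rows obtained by
-- transposing the padded columns (zip(*cols)) — instead of A's row-major passes (objective: alternative).

-- shared representation helpers: Python's flight.get(key, 'N/A') on the assoc-list dict
-- (first-match lookup, per the type convention), str.ljust and '-'*w (exact for w ≥ 0)
def fget : List (String × String) → String → String
  | [], _ => "N/A"
  | (k, v) :: rest, key => if k = key then v else fget rest key

def pyLjust (s : String) (w : Int) : String :=
  String.ofList (s.toList ++ List.replicate (w - (s.toList.length : Int)).toNat ' ')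

def dashes (w : Int) : String := String.ofList (List.replicate w.toNat '-')

-- ===== PORT A =====
-- the body of A's width loop: seven in-place max updates on the col_widths dict
def pvStepA (d : PySem.Dict String Int) (f : List (String × String)) : PySem.Dict String Int :=
  let d := d.insert "Airline" (max (d.getD "Airline" 0) (PySem.Str.len (fget f "airline")))
  let d := d.insert "Flight" (max (d.getD "Flight" 0) (PySem.Str.len (fget f "flight_number")))
  let d := d.insert "Departure" (max (d.getD "Departure" 0) (PySem.Str.len (fget f "departure_time")))
  let d := d.insert "Arrival" (max (d.getD "Arrival" 0) (PySem.Str.len (fget f "arrival_time")))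
  let d := d.insert "Duration" (max (d.getD "Duration" 0) (PySem.Str.len (fget f "duration")))
  let d := d.insert "Price" (max (d.getD "Price" 0) (PySem.Str.len (fget f "price")))
  let d := d.insert "Points" (max (d.getD "Points" 0) (PySem.Str.len (fget f "award_points")))
  d

def format_flight_data (flights : List (List (String × String))) : String :=
  if flights = [] then "No flights found." else
  let headers : List String := ["Airline", "Flight", "Departure", "Arrival", "Duration", "Price", "Points"]
  let colWidths0 : PySem.Dict String Int :=
    headers.foldl (fun d h => d.insert h (PySem.Str.len h)) PySem.Dict.empty
  let colWidths : PySem.Dict String Int := flights.foldl pvStepA colWidths0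
  let headerLine : String :=
    PySem.Str.join " | " (headers.map (fun h => pyLjust h (colWidths.getD h 0)))
  let separatorLine : String :=
    PySem.Str.join "-+-" (headers.map (fun h => dashes (colWidths.getD h 0)))
  let result : List String :=
    flights.foldl (fun result f =>
      let row : List String := []
      let row := row ++ [pyLjust (fget f "airline") (colWidths.getD "Airline" 0)]
      let row := row ++ [pyLjust (fget f "flight_number") (colWidths.getD "Flight" 0)]
      let row := row ++ [pyLjust (fget f "departure_time") (colWidths.getD "Departure" 0)]
      let row := row ++ [pyLjust (fget f "arrival_time") (colWidths.getD "Arrival" 0)]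
      let row := row ++ [pyLjust (fget f "duration") (colWidths.getD "Duration" 0)]
      let row := row ++ [pyLjust (fget f "price") (colWidths.getD "Price" 0)]
      let row := row ++ [pyLjust (fget f "award_points") (colWidths.getD "Points" 0)]
      result ++ [PySem.Str.join " | " row]) [headerLine, separatorLine]
  let result := result ++ ["\nTotal flights found: " ++ PySem.Int.toStr flights.length]
  PySem.Str.join "\n" result

-- ===== PORT B =====
-- Python's zip(*cols): rows of heads while every column is nonempty; fuel = length of the
-- first column bounds the number of rows (the guard, not the fuel, decides when to stop)
def zipStarGo : Nat → List (List String) → List (List String)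
  | 0, _ => []
  | n + 1, ls =>
      if ls.all (fun l => !l.isEmpty) then
        (ls.map (fun l => l.headD "")) :: zipStarGo n (ls.map (fun l => l.drop 1))
      else []

def pyZipStar (ls : List (List String)) : List (List String) :=
  match ls with
  | [] => []
  | l :: rest => zipStarGo l.length (l :: rest)

def format_flight_data_alt (flights : List (List (String × String))) : String :=
  if flights = [] then "No flights found." else
  let fields : List (String × String) :=
    [("Airline", "airline"), ("Flight", "flight_number"), ("Departure", "departure_time"),
     ("Arrival", "arrival_time"), ("Duration", "duration"), ("Price", "price"),
     ("Points", "award_points")]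
  let cols : List (List String) :=
    fields.foldl (fun cols p =>
      let cells : List String := p.1 :: flights.map (fun f => fget f p.2)
      let w : Int := (PySem.List.max? (cells.map PySem.Str.len) (fun y => y)).getD 0
      cols ++ [cells.map (fun c => pyLjust c w)]) []
  let rows : List String := (pyZipStar cols).map (fun r => PySem.Str.join " | " r)
  let sep : String :=
    PySem.Str.join "-+-" (cols.map (fun col => dashes (PySem.Str.len (PySem.List.pyGetD col 0 ""))))
  PySem.Str.join "\n"
    ([PySem.List.pyGetD rows 0 "", sep] ++ rows.drop 1 ++
      ["\nTotal flights found: " ++ PySem.Int.toStr flights.length])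

-- ===== PRECONDITION & SPEC =====
def Spec_format_flight_data (flights : List (List (String × String))) (out : String) : Prop := out = format_flight_data_alt flights
instance (flights : List (List (String × String))) (out : String) : Decidable (Spec_format_flight_data flights out) := by unfold Spec_format_flight_data; infer_instance

-- ===== CLAIM (what is proved, stated in full; the proofs are below) =====
def Claim_equal_format_flight_data : Prop := ∀ (flights : List (List (String × String))), Dom_format_flight_data flights → Spec_format_flight_data flights (format_flight_data flights)

-- ===== LEMMAS AND PROOFS =====

-- extraction of A's fold at each of the seven keys
theorem getD_foldl_airline (fs : List (List (String × String))) (d : PySem.Dict String Int) :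
    (fs.foldl pvStepA d).getD "Airline" 0
      = fs.foldl (fun w f => max w (PySem.Str.len (fget f "airline"))) (d.getD "Airline" 0) := by
  induction fs generalizing d with
  | nil => rfl
  | cons f fs ih => simp [List.foldl_cons, ih, pvStepA, PySem.Dict.getD_insert]

theorem getD_foldl_flight (fs : List (List (String × String))) (d : PySem.Dict String Int) :
    (fs.foldl pvStepA d).getD "Flight" 0
      = fs.foldl (fun w f => max w (PySem.Str.len (fget f "flight_number"))) (d.getD "Flight" 0) := by
  induction fs generalizing d with
  | nil => rfl
  | cons f fs ih => simp [List.foldl_cons, ih, pvStepA, PySem.Dict.getD_insert]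

theorem getD_foldl_departure (fs : List (List (String × String))) (d : PySem.Dict String Int) :
    (fs.foldl pvStepA d).getD "Departure" 0
      = fs.foldl (fun w f => max w (PySem.Str.len (fget f "departure_time"))) (d.getD "Departure" 0) := by
  induction fs generalizing d with
  | nil => rfl
  | cons f fs ih => simp [List.foldl_cons, ih, pvStepA, PySem.Dict.getD_insert]

theorem getD_foldl_arrival (fs : List (List (String × String))) (d : PySem.Dict String Int) :
    (fs.foldl pvStepA d).getD "Arrival" 0
      = fs.foldl (fun w f => max w (PySem.Str.len (fget f "arrival_time"))) (d.getD "Arrival" 0) := by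
  induction fs generalizing d with
  | nil => rfl
  | cons f fs ih => simp [List.foldl_cons, ih, pvStepA, PySem.Dict.getD_insert]

theorem getD_foldl_duration (fs : List (List (String × String))) (d : PySem.Dict String Int) :
    (fs.foldl pvStepA d).getD "Duration" 0
      = fs.foldl (fun w f => max w (PySem.Str.len (fget f "duration"))) (d.getD "Duration" 0) := by
  induction fs generalizing d with
  | nil => rfl
  | cons f fs ih => simp [List.foldl_cons, ih, pvStepA, PySem.Dict.getD_insert]

theorem getD_foldl_price (fs : List (List (String × String))) (d : PySem.Dict String Int) :
    (fs.foldl pvStepA d).getD "Price" 0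
      = fs.foldl (fun w f => max w (PySem.Str.len (fget f "price"))) (d.getD "Price" 0) := by
  induction fs generalizing d with
  | nil => rfl
  | cons f fs ih => simp [List.foldl_cons, ih, pvStepA, PySem.Dict.getD_insert]

theorem getD_foldl_points (fs : List (List (String × String))) (d : PySem.Dict String Int) :
    (fs.foldl pvStepA d).getD "Points" 0
      = fs.foldl (fun w f => max w (PySem.Str.len (fget f "award_points"))) (d.getD "Points" 0) := by
  induction fs generalizing d with
  | nil => rfl
  | cons f fs ih => simp [List.foldl_cons, ih, pvStepA, PySem.Dict.getD_insert]

-- transpose of seven mapped-over-the-same-list columns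
theorem zipStarGo_maps7 {X : Type} (xs : List X) (g1 g2 g3 g4 g5 g6 g7 : X → String) :
    zipStarGo xs.length [xs.map g1, xs.map g2, xs.map g3, xs.map g4, xs.map g5, xs.map g6, xs.map g7]
      = xs.map (fun x => [g1 x, g2 x, g3 x, g4 x, g5 x, g6 x, g7 x]) := by
  induction xs with
  | nil => rfl
  | cons x xs ih => simp [zipStarGo, ih]

theorem pyZipStar7 {X : Type} (a1 a2 a3 a4 a5 a6 a7 : String) (xs : List X)
    (g1 g2 g3 g4 g5 g6 g7 : X → String) :
    pyZipStar [a1 :: xs.map g1, a2 :: xs.map g2, a3 :: xs.map g3, a4 :: xs.map g4,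
               a5 :: xs.map g5, a6 :: xs.map g6, a7 :: xs.map g7]
      = [a1, a2, a3, a4, a5, a6, a7]
          :: xs.map (fun x => [g1 x, g2 x, g3 x, g4 x, g5 x, g6 x, g7 x]) := by
  simp [pyZipStar, zipStarGo, zipStarGo_maps7]

theorem len_pyLjust_of_le (s : String) (w : Int) (h : PySem.Str.len s ≤ w) :
    PySem.Str.len (pyLjust s w) = w := by
  simp [pyLjust] at *
  omega

theorem len_pyLjust_w {X : Type} (s : String) (xs : List X) (g : X → String) :
    PySem.Str.len (pyLjust s (xs.foldl (fun a x => max a (PySem.Str.len (g x))) (PySem.Str.len s)))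
      = xs.foldl (fun a x => max a (PySem.Str.len (g x))) (PySem.Str.len s) := by
  have h : ∀ (t : List X) (a : Int), a ≤ t.foldl (fun a x => max a (PySem.Str.len (g x))) a := by
    intro t
    induction t with
    | nil => intro a; simp
    | cons x t ih => intro a; exact le_trans (le_max_left a _) (ih _)
  exact len_pyLjust_of_le _ _ (h xs _)

-- ===== VERDICT (by name: the statement is the Claim_ definition above) =====
set_option maxHeartbeats 2000000 in
theorem format_flight_data_spec : Claim_equal_format_flight_data := by
  intro flights _
  unfold Spec_format_flight_data format_flight_data format_flight_data_alt
  by_cases hne : flights = []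
  · rw [if_pos hne, if_pos hne]
  · rw [if_neg hne, if_neg hne]
    simp only [List.foldl_cons, List.foldl_nil, List.map_cons, List.map_nil, List.map_map,
      Function.comp_def, PySem.List.max?_id_cons, Option.getD_some, List.nil_append,
      List.cons_append, List.foldl_map, pyZipStar7, PySem.List.pyGetD_zero_cons,
      List.drop_succ_cons, List.drop_zero, len_pyLjust_w,
      PySem.List.foldl_append_singleton_eq_map,
      PySem.Dict.getD_insert, PySem.Dict.getD_empty, reduceIte, String.reduceEq,
      getD_foldl_airline, getD_foldl_flight, getD_foldl_departure, getD_foldl_arrival,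
      getD_foldl_duration, getD_foldl_price, getD_foldl_points]
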